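-- pv_equiv track=rewrite | github.com/DancingOnAir/LeetcodePythonSolution | String/2038_remove_colored_pieces_if_both_neighbors_are_the_same_color.py | winnerOfGame
-- ===== SOURCE A (Python) =====
-- def winnerOfGame(colors: str) -> bool:
--     res = 0
--     for i in range(1, len(colors) - 1):
--         if colors[i - 1] == colors[i] == colors[i + 1]:
--             if colors[i] == 'A':
--                 res += 1
--             else:
--                 res -= 1
--     return res > 0
-- ===== SOURCE B (Python) =====
-- def winnerOfGame(colors: str) -> bool:
--     # Run-length decomposition: a maximal run of length L contributes
--     # max(L - 2, 0) removable pieces to its player; Alice wins iff strictly more.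
--     alice = bob = 0
--     i, n = 0, len(colors)
--     while i < n:
--         j = i
--         while j < n and colors[j] == colors[i]:
--             j += 1
--         L = j - i
--         if L > 2:
--             if colors[i] == 'A':
--                 alice += L - 2
--             else:
--                 bob += L - 2
--         i = j
--     return alice > bob
-- ===== Notes on version B (the rewrite author's own statement) =====
-- stated objective: alternative
-- what changed: Replaces the index-by-index triple test (colors[i-1]==colors[i]==colors[i+1] with a signed counter) by a run-length scan that adds max(L-2,0) per maximal run to Alice's or Bob's total and compares them.
import Mathlib
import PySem

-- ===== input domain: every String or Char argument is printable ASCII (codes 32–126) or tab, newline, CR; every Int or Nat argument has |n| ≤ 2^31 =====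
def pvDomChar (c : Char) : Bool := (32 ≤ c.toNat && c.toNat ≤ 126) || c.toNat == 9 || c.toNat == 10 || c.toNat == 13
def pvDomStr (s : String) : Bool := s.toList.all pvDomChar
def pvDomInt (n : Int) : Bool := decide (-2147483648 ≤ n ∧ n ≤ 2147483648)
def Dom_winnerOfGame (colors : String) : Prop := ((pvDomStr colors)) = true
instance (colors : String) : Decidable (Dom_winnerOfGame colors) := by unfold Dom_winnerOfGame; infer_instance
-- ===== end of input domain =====

-- B replaces the per-index triple test by a run-length scan (same O(n) cost, different decomposition).

-- ===== PORT A =====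
def winnerOfGame (colors : String) : Bool :=
  let l := colors.toList
  let res : Int := (PySem.List.pyRange 1 ((l.length : Int) - 1) 1).foldl
    (fun res i =>
      if PySem.List.pyGet? l (i - 1) = PySem.List.pyGet? l i ∧
         PySem.List.pyGet? l i = PySem.List.pyGet? l (i + 1) then
        if PySem.List.pyGet? l i = some 'A' then res + 1 else res - 1
      else res) 0
  decide (res > 0)

-- ===== PORT B =====
-- forward run-length scan: runsAux c n t = runs of (c repeated n times) ++ t
def runsAux (c : Char) (n : Nat) : List Char → List (Char × Nat)
  | [] => [(c, n)]
  | x :: t => if x = c then runsAux c (n + 1) t else (c, n) :: runsAux x 1 t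

def winnerOfGame_alt (colors : String) : Bool :=
  let rs : List (Char × Nat) :=
    match colors.toList with
    | [] => []
    | c :: t => runsAux c 1 t
  let p : Int × Int := rs.foldl
    (fun ab r =>
      if r.2 > 2 then
        if r.1 = 'A' then (ab.1 + (r.2 : Int) - 2, ab.2) else (ab.1, ab.2 + (r.2 : Int) - 2)
      else ab) (0, 0)
  decide (p.1 > p.2)

-- ===== PRECONDITION & SPEC =====
def Spec_winnerOfGame (colors : String) (out : Bool) : Prop := out = winnerOfGame_alt colors
instance (colors : String) (out : Bool) : Decidable (Spec_winnerOfGame colors out) := by unfold Spec_winnerOfGame; infer_instance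

-- ===== CLAIM (what is proved, stated in full; the proofs are below) =====
def Claim_equal_winnerOfGame : Prop := ∀ (colors : String), Dom_winnerOfGame colors → Spec_winnerOfGame colors (winnerOfGame colors)

-- ===== LEMMAS AND PROOFS =====

-- the signed count of monochromatic triples, structurally
def triSum : List Char → Int
  | a :: b :: c :: t => (if a = b ∧ b = c then (if b = 'A' then 1 else -1) else 0) + triSum (b :: c :: t)
  | _ => 0

-- per-index contribution of A's loop body (option form, as in the port)
def gIdx (l : List Char) (k : Nat) : Int :=
  if l[k]? = l[k+1]? ∧ l[k+1]? = l[k+2]? then (if l[k+1]? = some 'A' then 1 else -1) else 0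

-- weight of one run
def wt (r : Char × Nat) : Int :=
  (if r.1 = 'A' then 1 else -1) * max ((r.2 : Int) - 2) 0

lemma gIdx_cons (a : Char) (l : List Char) (k : Nat) : gIdx (a :: l) (k + 1) = gIdx l k := by
  simp only [gIdx, List.getElem?_cons_succ]
  rfl

lemma sum_gIdx (l : List Char) :
    ((List.range (l.length - 2)).map (gIdx l)).sum = triSum l := by
  induction l using triSum.induct with
  | case1 a b c t ih =>
      have hlen : (a :: b :: c :: t).length - 2 = ((b :: c :: t).length - 2) + 1 := by
        simp
      rw [hlen, List.range_succ_eq_map]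
      simp only [List.map_cons, List.map_map, List.sum_cons]
      have h1 : gIdx (a :: b :: c :: t) 0
          = (if a = b ∧ b = c then (if b = 'A' then (1:Int) else -1) else 0) := by
        simp [gIdx]
      have h2 : (List.range ((b :: c :: t).length - 2)).map (gIdx (a :: b :: c :: t) ∘ Nat.succ)
          = (List.range ((b :: c :: t).length - 2)).map (gIdx (b :: c :: t)) := by
        apply List.map_congr_left
        intro k _
        simpa [Function.comp] using gIdx_cons a (b :: c :: t) k
      rw [h1, h2, ih, triSum]
  | case2 l h => cases l with
      | nil => simp [triSum]
      | cons a t => cases t with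
        | nil => simp [triSum]
        | cons b u =>
            cases u with
            | nil => simp [triSum]
            | cons c v => exact absurd rfl (h a b c v)

-- A's fold equals triSum
lemma foldA_eq (l : List Char) :
    (PySem.List.pyRange 1 ((l.length : Int) - 1) 1).foldl
      (fun res i =>
        if PySem.List.pyGet? l (i - 1) = PySem.List.pyGet? l i ∧
           PySem.List.pyGet? l i = PySem.List.pyGet? l (i + 1) then
          if PySem.List.pyGet? l i = some 'A' then res + 1 else res - 1
        else res) 0 = triSum l := by
  rw [PySem.List.pyRange_one, List.foldl_map]
  have hfun : (fun (x : Int) (y : Nat) =>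
      if PySem.List.pyGet? l (1 + (y : Int) - 1) = PySem.List.pyGet? l (1 + (y : Int)) ∧
         PySem.List.pyGet? l (1 + (y : Int)) = PySem.List.pyGet? l (1 + (y : Int) + 1) then
        if PySem.List.pyGet? l (1 + (y : Int)) = some 'A' then x + 1 else x - 1
      else x)
      = fun (res : Int) (k : Nat) => res + gIdx l k := by
    funext res k
    have e1 : (1 : Int) + (k : Int) - 1 = ((k : Nat) : Int) := by ring
    have e3 : (1 : Int) + (k : Int) + 1 = ((k + 2 : Nat) : Int) := by push_cast; ring
    have e2 : (1 : Int) + (k : Int) = ((k + 1 : Nat) : Int) := by push_cast; ring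
    rw [e1, e3, e2]
    simp only [PySem.List.pyGet?_natCast, gIdx]
    split_ifs <;> ring
  rw [hfun, PySem.List.foldl_add]
  have he : ((l.length : Int) - 1 - 1).toNat = l.length - 2 := by omega
  rw [he]
  simpa using sum_gIdx l

lemma triSum_cons_of_ne {c x : Char} (u : List Char) (h : c ≠ x) :
    triSum (c :: x :: u) = triSum (x :: u) := by
  cases u with
  | nil => simp [triSum]
  | cons y v => simp [triSum, h]

-- mutual run/triple lemma
lemma runsAux_wt (t : List Char) :
    (∀ c : Char, ((runsAux c 1 t).map wt).sum = triSum (c :: t)) ∧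
    (∀ (c : Char) (n : Nat), 2 ≤ n →
      ((runsAux c n t).map wt).sum
        = (if c = 'A' then 1 else -1) * ((n : Int) - 2) + triSum (c :: c :: t)) := by
  induction t with
  | nil =>
      constructor
      · intro c; simp [runsAux, wt, triSum]
      · intro c n hn
        simp only [runsAux, List.map_cons, List.map_nil, List.sum_cons, List.sum_nil, wt, triSum]
        have : max ((n : Int) - 2) 0 = (n : Int) - 2 := by omega
        rw [this]
  | cons x t' ih =>
      obtain ⟨ihQ, ihP⟩ := ih
      constructor
      · intro c
        rw [runsAux]
        by_cases hxc : x = c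
        · rw [if_pos hxc]; subst hxc
          rw [ihP x 2 (by omega)]
          push_cast; ring
        · rw [if_neg hxc]
          simp only [List.map_cons, List.sum_cons]
          rw [ihQ x]
          have hw : wt (c, 1) = 0 := by simp [wt]
          rw [hw, triSum_cons_of_ne t' (fun h => hxc h.symm)]
          ring
      · intro c n hn
        rw [runsAux]
        by_cases hxc : x = c
        · rw [if_pos hxc]; subst hxc
          rw [ihP x (n + 1) (by omega)]
          have h3 : triSum (x :: x :: x :: t') = (if x = 'A' then 1 else -1) + triSum (x :: x :: t') := by
            rw [triSum]; simp
          rw [h3]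
          push_cast
          split_ifs <;> ring
        · rw [if_neg hxc]
          simp only [List.map_cons, List.sum_cons]
          rw [ihQ x]
          have hw : wt (c, n) = (if c = 'A' then 1 else -1) * ((n : Int) - 2) := by
            simp only [wt]
            have : max ((n : Int) - 2) 0 = (n : Int) - 2 := by omega
            rw [this]
          rw [hw]
          have h1 : triSum (c :: c :: x :: t') = triSum (c :: x :: t') := by
            rw [triSum, if_neg (fun h => hxc h.2.symm), zero_add]
          rw [h1, triSum_cons_of_ne t' (fun h => hxc h.symm)]

-- B's pair fold: difference of components
lemma foldB_diff (rs : List (Char × Nat)) (ab : Int × Int) :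
    (rs.foldl
      (fun ab r =>
        if r.2 > 2 then
          if r.1 = 'A' then (ab.1 + (r.2 : Int) - 2, ab.2) else (ab.1, ab.2 + (r.2 : Int) - 2)
        else ab) ab).1
    - (rs.foldl
      (fun ab r =>
        if r.2 > 2 then
          if r.1 = 'A' then (ab.1 + (r.2 : Int) - 2, ab.2) else (ab.1, ab.2 + (r.2 : Int) - 2)
        else ab) ab).2
    = ab.1 - ab.2 + (rs.map wt).sum := by
  induction rs generalizing ab with
  | nil => simp
  | cons r rs ih =>
      simp only [List.foldl_cons, List.map_cons, List.sum_cons]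
      rw [ih]
      by_cases h2 : r.2 > 2
      · have hmax : max ((r.2 : Int) - 2) 0 = (r.2 : Int) - 2 := by omega
        by_cases hA : r.1 = 'A' <;> simp [h2, hA, wt, hmax] <;> ring
      · have hmax : max ((r.2 : Int) - 2) 0 = 0 := by omega
        simp [h2, wt, hmax]

-- ===== VERDICT (by name: the statement is the Claim_ definition above) =====
theorem winnerOfGame_spec : Claim_equal_winnerOfGame := by
  intro colors _
  unfold Spec_winnerOfGame winnerOfGame winnerOfGame_alt
  simp only []
  rw [foldA_eq]
  cases hl : colors.toList with
  | nil => simp [triSum]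
  | cons c t =>
      have hdiff := foldB_diff (runsAux c 1 t) (0, 0)
      have hQ := (runsAux_wt t).1 c
      rw [hQ] at hdiff
      simp only [decide_eq_decide]
      omega
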